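-- pv_equiv track=rewrite | github.com/rothoma2/not-so-standard-package | features/utils.py | gl4_converter
-- ===== SOURCE A (Python) =====
-- import string
--
-- def gl4_converter(x):
--
--     output = ''
--
--     for s in x:
--         if s in string.ascii_lowercase:
--            output+='L'
--         elif s in string.ascii_uppercase:
--             output+='U'
--         elif s in string.digits:
--             output+='D'
--         elif s in string.punctuation:
--             output+='S'
--         else:
--             pass
--     return(output)
-- ===== SOURCE B (Python) =====
-- _BOUNDS = [33, 48, 58, 65, 91, 97, 123, 127]
-- _TAGS = ['', 'S', 'D', 'S', 'U', 'S', 'L', 'S', '']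
--
-- def _bisect_right(bounds, v):
--     lo, hi = 0, len(bounds)
--     while lo < hi:
--         mid = (lo + hi) // 2
--         if v < bounds[mid]:
--             hi = mid
--         else:
--             lo = mid + 1
--     return lo
--
-- def gl4_converter(x):
--     pieces = []
--     for c in x:
--         pieces.append(_TAGS[_bisect_right(_BOUNDS, ord(c))])
--     return ''.join(pieces)
-- ===== Notes on version B (the rewrite author's own statement) =====
-- stated objective: alternative
-- what changed: Replaces A's if/elif membership scans over the four category strings with a hand-written binary search (bisect_right) over the eight ASCII code-point boundaries of the categories, indexing into a tag table; no category strings are consulted at all.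
import Mathlib
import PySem

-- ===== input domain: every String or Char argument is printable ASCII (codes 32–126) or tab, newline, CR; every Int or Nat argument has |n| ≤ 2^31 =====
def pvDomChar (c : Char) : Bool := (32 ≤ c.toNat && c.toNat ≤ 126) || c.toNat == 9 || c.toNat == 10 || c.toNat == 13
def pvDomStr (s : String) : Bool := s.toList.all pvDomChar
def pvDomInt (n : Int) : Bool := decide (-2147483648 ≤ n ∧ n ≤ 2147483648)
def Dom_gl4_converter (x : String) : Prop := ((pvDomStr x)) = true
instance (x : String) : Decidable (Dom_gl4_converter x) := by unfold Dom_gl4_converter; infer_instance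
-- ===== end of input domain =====

set_option maxRecDepth 20000

-- B replaces A's per-character if/elif membership scans over the four category strings
-- with a binary search over the categories' ASCII code-point boundaries (objective: alternative).

-- the four constant strings from Python's `string` module (used by A only)
def gl4Lower : List Char := "abcdefghijklmnopqrstuvwxyz".toList
def gl4Upper : List Char := "ABCDEFGHIJKLMNOPQRSTUVWXYZ".toList
def gl4Digits : List Char := "0123456789".toList
def gl4Punct : List Char := "!\"#$%&'()*+,-./:;<=>?@[\\]^_`{|}~".toList

-- ===== PORT A =====
def gl4_converter (x : String) : String :=
  String.mk (x.toList.foldl (fun output s =>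
    if gl4Lower.contains s then output ++ ['L']
    else if gl4Upper.contains s then output ++ ['U']
    else if gl4Digits.contains s then output ++ ['D']
    else if gl4Punct.contains s then output ++ ['S']
    else output) [])

-- ===== PORT B =====
def gl4Bounds : List Int := [33, 48, 58, 65, 91, 97, 123, 127]
def gl4Tags : List String := ["", "S", "D", "S", "U", "S", "L", "S", ""]

-- the while-loop of _bisect_right; fuel = len(bounds) bounds the iteration count
def gl4BisectGo (bounds : List Int) (v : Int) : Nat → Nat → Nat → Nat
  | 0, lo, _ => lo
  | fuel + 1, lo, hi =>
      if lo < hi then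
        let mid := (lo + hi) / 2
        if v < bounds.getD mid 0 then gl4BisectGo bounds v fuel lo mid
        else gl4BisectGo bounds v fuel (mid + 1) hi
      else lo

def gl4BisectRight (bounds : List Int) (v : Int) : Nat :=
  gl4BisectGo bounds v bounds.length 0 bounds.length

-- ''.join of the per-character tag lookups
def gl4_converter_alt (x : String) : String :=
  String.mk ((x.toList.map (fun c =>
    (gl4Tags.getD (gl4BisectRight gl4Bounds (c.toNat : Int)) "").toList)).flatten)

-- ===== PRECONDITION & SPEC =====
def Spec_gl4_converter (x : String) (out : String) : Prop := out = gl4_converter_alt x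
instance (x : String) (out : String) : Decidable (Spec_gl4_converter x out) := by unfold Spec_gl4_converter; infer_instance

-- ===== CLAIM (what is proved, stated in full; the proofs are below) =====
def Claim_equal_gl4_converter : Prop := ∀ (x : String), Dom_gl4_converter x → Spec_gl4_converter x (gl4_converter x)

-- ===== LEMMAS AND PROOFS =====

-- A's loop body, as a per-character piece
def gl4StepA (s : Char) : List Char :=
  if gl4Lower.contains s then ['L']
  else if gl4Upper.contains s then ['U']
  else if gl4Digits.contains s then ['D']
  else if gl4Punct.contains s then ['S']
  else []

-- A's accumulating fold emits the concatenation of the per-character pieces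
theorem gl4_foldl_eq (l : List Char) (acc : List Char) :
    l.foldl (fun output s =>
      if gl4Lower.contains s then output ++ ['L']
      else if gl4Upper.contains s then output ++ ['U']
      else if gl4Digits.contains s then output ++ ['D']
      else if gl4Punct.contains s then output ++ ['S']
      else output) acc = acc ++ (l.map gl4StepA).flatten := by
  induction l generalizing acc with
  | nil => simp
  | cons c t ih =>
      simp only [List.foldl_cons, List.map_cons, List.flatten_cons, ih]
      have : (if gl4Lower.contains c then acc ++ ['L']
        else if gl4Upper.contains c then acc ++ ['U']
        else if gl4Digits.contains c then acc ++ ['D']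
        else if gl4Punct.contains c then acc ++ ['S']
        else acc) = acc ++ gl4StepA c := by
        unfold gl4StepA; split_ifs <;> simp
      rw [this, List.append_assoc]

-- on every ASCII character the per-character pieces of A and B agree (checked by computation)
theorem gl4_step_agree_fin :
    ∀ n : Fin 127, gl4StepA (Char.ofNat n) =
      (gl4Tags.getD (gl4BisectRight gl4Bounds ((Char.ofNat n).toNat : Int)) "").toList := by
  decide

theorem gl4_step_agree (c : Char) (h : pvDomChar c = true) :
    gl4StepA c = (gl4Tags.getD (gl4BisectRight gl4Bounds (c.toNat : Int)) "").toList := by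
  have hlt : c.toNat < 127 := by
    simp only [pvDomChar, Bool.or_eq_true, Bool.and_eq_true, decide_eq_true_eq,
      beq_iff_eq] at h
    omega
  have := gl4_step_agree_fin ⟨c.toNat, hlt⟩
  simpa [Char.ofNat_toNat] using this

-- ===== VERDICT (by name: the statement is the Claim_ definition above) =====
theorem gl4_converter_spec : Claim_equal_gl4_converter := by
  intro x hdom
  unfold Spec_gl4_converter gl4_converter gl4_converter_alt
  rw [gl4_foldl_eq]
  simp only [List.nil_append]
  congr 1
  congr 1
  apply List.map_congr_left
  intro c hc
  exact gl4_step_agree c (by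
    have := (List.all_eq_true.mp hdom) c hc
    simpa using this)
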